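-- pv_equiv track=rewrite | github.com/Shiva-code63/ams2 | python-face-service/utils/liveness_utils.py | detect_blink
-- ===== SOURCE A (Python) =====
-- from typing import List
--
-- def detect_blink(eye_counts: List[int]) -> bool:
--     # Blink heuristic: eyes detected in some frames, and not detected in at least one frame.
--     if len(eye_counts) < 4:
--         return False
--     any_open = any(c >= 1 for c in eye_counts)
--     any_closed = any(c == 0 for c in eye_counts)
--     # Also accept a significant drop (e.g., 2 -> 1 -> 0 can be flaky across cascades).
--     max_c = max(eye_counts)
--     min_c = min(eye_counts)
--     significant_drop = max_c >= 1 and (max_c - min_c) >= 1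
--     return any_open and (any_closed or significant_drop)
-- ===== SOURCE B (Python) =====
-- from typing import List
--
-- def detect_blink(eye_counts: List[int]) -> bool:
--     # Sort once; blink iff some frame sees an eye (max >= 1) and counts are not
--     # all equal (min < max).  Equivalent to A: any_closed (a literal 0 in the
--     # list) together with max >= 1 forces min <= 0 < max, and significant_drop
--     # is exactly max >= 1 and min < max, so A's disjunction collapses.
--     if len(eye_counts) < 4:
--         return False
--     s = sorted(eye_counts)
--     return s[-1] >= 1 and s[0] < s[-1]
-- ===== Notes on version B (the rewrite author's own statement) =====
-- stated objective: simpler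
-- what changed: Replaces A's four scans and three boolean flags by sorting once and comparing the sorted extremes, after proving A's condition collapses to max>=1 and min<max (the any_closed disjunct is subsumed).
import Mathlib
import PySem

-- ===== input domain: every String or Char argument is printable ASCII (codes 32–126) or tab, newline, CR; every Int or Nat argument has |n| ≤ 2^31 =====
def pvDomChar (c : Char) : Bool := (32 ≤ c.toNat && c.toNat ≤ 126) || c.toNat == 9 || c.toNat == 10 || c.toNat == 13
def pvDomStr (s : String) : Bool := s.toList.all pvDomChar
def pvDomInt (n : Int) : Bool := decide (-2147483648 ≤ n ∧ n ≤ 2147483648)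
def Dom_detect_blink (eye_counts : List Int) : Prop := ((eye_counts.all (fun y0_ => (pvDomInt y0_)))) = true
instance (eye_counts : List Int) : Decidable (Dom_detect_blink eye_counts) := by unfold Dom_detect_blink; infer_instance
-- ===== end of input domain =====

-- B sorts once and compares the sorted extremes, after the proved collapse of A's
-- condition to max >= 1 and min < max (a simpler, genuinely different decomposition).

-- ===== PORT A =====
def detect_blink (eye_counts : List Int) : Bool :=
  if eye_counts.length < 4 then false
  else
    let any_open := eye_counts.any (fun c => decide (c ≥ 1))
    let any_closed := eye_counts.any (fun c => c == 0)
    -- max()/min() on a list the guard above makes nonempty, so getD is never taken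
    let max_c := (PySem.List.max? eye_counts (fun x => x)).getD 0
    let min_c := (PySem.List.min? eye_counts (fun x => x)).getD 0
    let significant_drop := decide (max_c ≥ 1) && decide (max_c - min_c ≥ 1)
    any_open && (any_closed || significant_drop)

-- ===== PORT B =====
def detect_blink_alt (eye_counts : List Int) : Bool :=
  if eye_counts.length < 4 then false
  else
    let s := PySem.List.sorted eye_counts (fun x => x) false
    -- s[-1] / s[0] on a list the guard makes nonempty, so getD is never taken
    let last := (PySem.List.pyGet? s (-1)).getD 0
    let first := (PySem.List.pyGet? s 0).getD 0
    decide (last ≥ 1) && decide (first < last)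

-- ===== PRECONDITION & SPEC =====
def Spec_detect_blink (eye_counts : List Int) (out : Bool) : Prop := out = detect_blink_alt eye_counts
instance (eye_counts : List Int) (out : Bool) : Decidable (Spec_detect_blink eye_counts out) := by unfold Spec_detect_blink; infer_instance

-- ===== CLAIM =====
def Claim_equal_detect_blink : Prop := ∀ (eye_counts : List Int), Dom_detect_blink eye_counts → Spec_detect_blink eye_counts (detect_blink eye_counts)

-- ===== LEMMAS AND PROOFS =====

-- head of sorted(h::t) is the running min, last is the running max
theorem sorted_head_last (h : Int) (t : List Int) :
    (PySem.List.sorted (h :: t) (fun x => x) false).head? = some (t.foldl min h) ∧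
    (PySem.List.sorted (h :: t) (fun x => x) false).getLast? = some (t.foldl max h) := by
  set l := h :: t with hl
  set s := PySem.List.sorted l (fun x => x) false with hs
  have hm : PySem.List.min? l (fun x => x) = some (t.foldl min h) := PySem.List.min?_id_cons h t
  have hM : PySem.List.max? l (fun x => x) = some (t.foldl max h) := PySem.List.max?_id_cons h t
  have hmmem : t.foldl min h ∈ l := PySem.List.min?_mem hm
  have hMmem : t.foldl max h ∈ l := PySem.List.max?_mem hM
  have hmmin := PySem.List.min?_isMin hm
  have hMmax := PySem.List.max?_isMax hM
  have hsne : s ≠ [] := by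
    intro hnil
    have := (PySem.List.sorted_eq_nil_iff (xs := l) (key := fun x => x) (rev := false)).mp hnil
    simp [hl] at this
  obtain ⟨m0, ts, hcons⟩ := List.exists_cons_of_ne_nil hsne
  constructor
  · rw [hcons]
    have hm0mem : m0 ∈ l := by
      rw [← PySem.List.mem_sorted (xs := l) (key := fun x => x) (rev := false), ← hs, hcons]
      exact List.mem_cons_self
    have h1 : m0 ≤ t.foldl min h :=
      PySem.List.key_head_sorted_le l (fun x => x) (by rw [← hs, hcons]) _ hmmem
    have h2 : t.foldl min h ≤ m0 := hmmin m0 hm0mem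
    simp [le_antisymm h1 h2]
  · -- last element equals the max
    have hlen : 0 < s.length := by rw [hcons]; simp
    have hlast : s.getLast? = some s[s.length - 1] := by
      rw [List.getLast?_eq_getElem?]
      exact List.getElem?_eq_getElem (by omega)
    rw [hlast]
    have hLmem : s[s.length - 1] ∈ l := by
      rw [← PySem.List.mem_sorted (xs := l) (key := fun x => x) (rev := false), ← hs]
      exact List.getElem_mem _
    have hle : s[s.length - 1] ≤ t.foldl max h := hMmax _ hLmem
    have hMs : t.foldl max h ∈ s := by
      rw [hs, PySem.List.mem_sorted]; exact hMmem
    obtain ⟨p, hp, hpe⟩ := List.mem_iff_getElem.mp hMs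
    have hge : t.foldl max h ≤ s[s.length - 1] := by
      have hmono : s[p]'hp ≤ s[s.length - 1]'(by omega) :=
        PySem.List.sorted_id_getElem_mono l (p := p) (q := s.length - 1)
          (by omega) (by rw [← hs]; omega)
      exact (le_of_eq hpe.symm).trans hmono
    simp [le_antisymm hle hge]

theorem detect_blink_spec : Claim_equal_detect_blink := by
  intro eye_counts _
  unfold Spec_detect_blink detect_blink detect_blink_alt
  split
  · rfl
  case isFalse hlen =>
    match eye_counts, hlen with
    | h :: t, hlen =>
      dsimp only
      obtain ⟨hhead, hlast⟩ := sorted_head_last h t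
      rw [PySem.List.max?_id_cons h t, PySem.List.min?_id_cons h t,
          PySem.List.pyGet?_neg_one, hlast, PySem.List.pyGet?_zero, ← List.head?_eq_getElem?, hhead]
      simp only [Option.getD_some]
      set M := t.foldl max h with hM
      set m := t.foldl min h with hm
      have hMmax := PySem.List.max?_isMax (PySem.List.max?_id_cons h t)
      have hmmin := PySem.List.min?_isMin (PySem.List.min?_id_cons h t)
      by_cases hM1 : M ≥ 1
      · have hopen : (h :: t).any (fun c => decide (c ≥ 1)) = true := by
          have hMmem : M ∈ h :: t := PySem.List.max?_mem (PySem.List.max?_id_cons h t)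
          exact List.any_eq_true.mpr ⟨M, hMmem, by simpa using hM1⟩
        by_cases hcl : (h :: t).any (fun c => c == 0) = true
        · obtain ⟨z, hzmem, hz0⟩ := List.any_eq_true.mp hcl
          have hz : z = 0 := by simpa using hz0
          have hmz : m ≤ z := hmmin z hzmem
          have : m < M := by omega
          simp [hopen, hcl, hM1, this]
        · have hd : (decide (M - m ≥ 1)) = (decide (m < M)) := by
            apply decide_eq_decide.mpr; omega
          simp [hopen, hcl, hM1, hd]
      · have hopen : (h :: t).any (fun c => decide (c ≥ 1)) = false := by
          rw [List.any_eq_false]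
          intro x hx
          have := hMmax x hx
          simp only [decide_eq_true_eq] at this ⊢
          omega
        simp [hopen, hM1]
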